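-- pv_equiv track=rewrite | github.com/IVRL/LELSD | utils/stylegan2_utils.py | s_to_ys
-- ===== SOURCE A (Python) =====
-- def s_to_ys(s):
--     ys = []
--     rgb_ys = []
--     for i in [0, 2, 3, 5, 6, 8, 9, 11, 12, 14, 15, 17, 18, 20, 21, 23, 24, 26]:
--         if i < len(s):
--             ys.append(s[i])
--     for i in [1, 4, 7, 10, 13, 16, 19, 22, 25]:
--         if i < len(s):
--             rgb_ys.append(s[i])
--
--     return ys, rgb_ys
-- ===== SOURCE B (Python) =====
-- def s_to_ys(s):
--     ys = []
--     rgb_ys = []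
--     for i, x in enumerate(s):
--         if i > 26:
--             break
--         if i % 3 == 1:
--             rgb_ys.append(x)
--         else:
--             ys.append(x)
--     return ys, rgb_ys
-- ===== Notes on version B (the rewrite author's own statement) =====
-- stated objective: simpler
-- what changed: Replaces the two hardcoded index-list loops with a single enumerate pass that stops past index 26 and classifies each position by i % 3 == 1.
import Mathlib
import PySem

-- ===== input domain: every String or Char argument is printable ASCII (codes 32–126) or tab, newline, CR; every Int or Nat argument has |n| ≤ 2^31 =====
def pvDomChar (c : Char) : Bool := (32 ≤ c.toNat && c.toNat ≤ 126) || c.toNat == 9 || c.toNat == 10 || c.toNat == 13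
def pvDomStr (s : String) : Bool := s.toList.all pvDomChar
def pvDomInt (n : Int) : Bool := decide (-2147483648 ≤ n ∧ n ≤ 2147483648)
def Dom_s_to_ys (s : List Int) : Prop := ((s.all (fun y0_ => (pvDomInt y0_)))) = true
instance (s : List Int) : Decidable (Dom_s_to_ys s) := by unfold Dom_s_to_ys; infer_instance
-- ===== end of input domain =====

-- B replaces A's two hardcoded index-list loops by one enumerate pass classified by i % 3 == 1 (simpler; same cost).

-- ===== PORT A =====
def s_to_ys (s : List Int) : List Int × List Int :=
  let ys := ([0, 2, 3, 5, 6, 8, 9, 11, 12, 14, 15, 17, 18, 20, 21, 23, 24, 26] : List Nat).foldl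
    (fun acc i => if i < s.length then acc ++ [s.getD i 0] else acc) []
  let rgb_ys := ([1, 4, 7, 10, 13, 16, 19, 22, 25] : List Nat).foldl
    (fun acc i => if i < s.length then acc ++ [s.getD i 0] else acc) []
  (ys, rgb_ys)

-- ===== PORT B =====
def s_to_ys_go (s : List Int) (i : Nat) (ys rgb_ys : List Int) : List Int × List Int :=
  match s with
  | [] => (ys, rgb_ys)
  | x :: r =>
    if 26 < i then (ys, rgb_ys)
    else if i % 3 = 1 then s_to_ys_go r (i + 1) ys (rgb_ys ++ [x])
    else s_to_ys_go r (i + 1) (ys ++ [x]) rgb_ys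

def s_to_ys_alt (s : List Int) : List Int × List Int :=
  s_to_ys_go s 0 [] []

-- ===== PRECONDITION & SPEC =====
def Spec_s_to_ys (s : List Int) (out : List Int × List Int) : Prop := out = s_to_ys_alt s
instance (s : List Int) (out : List Int × List Int) : Decidable (Spec_s_to_ys s out) := by unfold Spec_s_to_ys; infer_instance

-- ===== CLAIM (what is proved, stated in full; the proofs are below) =====
def Claim_equal_s_to_ys : Prop := ∀ (s : List Int), Dom_s_to_ys s → Spec_s_to_ys s (s_to_ys s)

-- ===== LEMMAS AND PROOFS =====

-- A's loop body characterized: append s[i] for each index of L that is in range.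
theorem foldl_ifappend (L : List Nat) (a : List Int) (n : Nat) (g : Nat → Int) :
    L.foldl (fun acc i => if i < n then acc ++ [g i] else acc) a
      = a ++ (L.filter (fun i => decide (i < n))).map g := by
  induction L generalizing a with
  | nil => simp
  | cons h t ih =>
    simp only [List.foldl_cons, List.filter_cons]
    by_cases hh : h < n
    · simp [hh, ih, List.append_assoc]
    · simp [hh, ih]

-- accumulator-free version of B's loop
def selB (s : List Int) (i : Nat) : List Int × List Int :=
  match s with
  | [] => ([], [])
  | x :: r =>
    if 26 < i then ([], [])
    else if i % 3 = 1 then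
      let p := selB r (i + 1); (p.1, x :: p.2)
    else
      let p := selB r (i + 1); (x :: p.1, p.2)

theorem go_eq_selB (s : List Int) (i : Nat) (ys rgb : List Int) :
    s_to_ys_go s i ys rgb = (ys ++ (selB s i).1, rgb ++ (selB s i).2) := by
  induction s generalizing i ys rgb with
  | nil => simp [s_to_ys_go, selB]
  | cons x r ih =>
    simp only [s_to_ys_go, selB]
    by_cases h26 : 26 < i
    · simp [h26]
    · by_cases h3 : i % 3 = 1 <;> simp [h26, h3, ih, List.append_assoc]

theorem filter_lt_range (m n : Nat) :
    (List.range m).filter (fun j => decide (j < n)) = List.range (min n m) := by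
  induction m with
  | zero => simp
  | succ m ih =>
    rw [List.range_succ, List.filter_append, ih]
    by_cases h : m < n
    · have : min n (m + 1) = min n m + 1 := by omega
      rw [this, List.range_succ]
      simp [h]
      omega
    · have : min n (m + 1) = min n m := by omega
      simp [this, h]

theorem selB_fst (s : List Int) (i : Nat) (hi : i ≤ 27) :
    (selB s i).1 = ((List.range' i (min s.length (27 - i))).filter
        (fun j => !decide (j % 3 = 1))).map (fun j => s.getD (j - i) 0) := by
  induction s generalizing i with
  | nil => simp [selB]
  | cons x r ih =>
    by_cases h26 : 26 < i
    · have : 27 - i = 0 := by omega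
      simp [selB, h26, this]
    · have hlen : min (r.length + 1) (27 - i) = min r.length (26 - i) + 1 := by omega
      have hrec : 27 - (i + 1) = 26 - i := by omega
      have hih := ih (i + 1) (by omega)
      rw [hrec] at hih
      by_cases h3 : i % 3 = 1 <;>
        simp [selB, h26, h3, hih, hlen, List.range'_succ] <;>
        · intro a ha _ _
          have hji : a - i = (a - (i + 1)) + 1 := by omega
          simp [hji]

theorem selB_snd (s : List Int) (i : Nat) (hi : i ≤ 27) :
    (selB s i).2 = ((List.range' i (min s.length (27 - i))).filter
        (fun j => decide (j % 3 = 1))).map (fun j => s.getD (j - i) 0) := by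
  induction s generalizing i with
  | nil => simp [selB]
  | cons x r ih =>
    by_cases h26 : 26 < i
    · have : 27 - i = 0 := by omega
      simp [selB, h26, this]
    · have hlen : min (r.length + 1) (27 - i) = min r.length (26 - i) + 1 := by omega
      have hrec : 27 - (i + 1) = 26 - i := by omega
      have hih := ih (i + 1) (by omega)
      rw [hrec] at hih
      by_cases h3 : i % 3 = 1 <;>
        simp [selB, h26, h3, hih, hlen, List.range'_succ] <;>
        · intro a ha _ _
          have hji : a - i = (a - (i + 1)) + 1 := by omega
          simp [hji]

theorem idx_ys : ([0, 2, 3, 5, 6, 8, 9, 11, 12, 14, 15, 17, 18, 20, 21, 23, 24, 26] : List Nat)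
    = (List.range 27).filter (fun j => !decide (j % 3 = 1)) := by decide

theorem idx_rgb : ([1, 4, 7, 10, 13, 16, 19, 22, 25] : List Nat)
    = (List.range 27).filter (fun j => decide (j % 3 = 1)) := by decide

theorem common_form (s : List Int) (p : Nat → Bool) :
    ((List.range 27).filter p).foldl
        (fun acc i => if i < s.length then acc ++ [s.getD i 0] else acc) []
      = ((List.range' 0 (min s.length 27)).filter p).map (fun j => s.getD (j - 0) 0) := by
  rw [foldl_ifappend, List.nil_append, List.filter_filter]
  have h1 : ((List.range 27).filter (fun a => decide (a < s.length) && p a))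
      = ((List.range 27).filter (fun j => decide (j < s.length))).filter p := by
    rw [List.filter_filter]
    apply List.filter_congr
    intro a _
    exact Bool.and_comm _ _
  rw [h1, filter_lt_range, List.range_eq_range']
  simp

-- ===== VERDICT (by name: the statement is the Claim_ definition above) =====
theorem s_to_ys_spec : Claim_equal_s_to_ys := by
  intro s _
  unfold Spec_s_to_ys s_to_ys s_to_ys_alt
  rw [idx_ys, idx_rgb, common_form, common_form, go_eq_selB,
    selB_fst s 0 (by omega), selB_snd s 0 (by omega)]
  simp
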